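-- pv_equiv track=rewrite | github.com/martinpflaum/latex_to_html | antibugs.py | raw_remove_comments
-- ===== SOURCE A (Python) =====
-- def raw_remove_comments(input):
--     """
--     takes a raw string
--     """
--     comment = False
--     out = ""
--     empty = True
--     for elem in input:
--         if comment == False:
--             if elem == "%":
--                 comment = True
--                 empty = False
--             else:
--                 out += elem
--         else:
--             if elem == "%":
--                 if empty == False:
--                     comment = False
--             else:
--                 empty = False
--         if elem == "\n":
--             comment = False
--     return out
-- ===== SOURCE B (Python) =====
-- def raw_remove_comments(input):
--     """
--     takes a raw string
--     """
--     out = []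
--     i = 0
--     n = len(input)
--     while i < n:
--         j = input.find('%', i)
--         if j == -1:
--             out.append(input[i:])
--             break
--         out.append(input[i:j])
--         k = j + 1
--         while k < n and input[k] != '%' and input[k] != '\n':
--             k += 1
--         i = k + 1
--     return ''.join(out)
-- ===== Notes on version B (the rewrite author's own statement) =====
-- stated objective: faster
-- what changed: Replaced A's per-character comment/empty flag state machine by a chunked scan that uses str.find and slicing to copy whole non-comment chunks and skip whole comment bodies at once.
import Mathlib
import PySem

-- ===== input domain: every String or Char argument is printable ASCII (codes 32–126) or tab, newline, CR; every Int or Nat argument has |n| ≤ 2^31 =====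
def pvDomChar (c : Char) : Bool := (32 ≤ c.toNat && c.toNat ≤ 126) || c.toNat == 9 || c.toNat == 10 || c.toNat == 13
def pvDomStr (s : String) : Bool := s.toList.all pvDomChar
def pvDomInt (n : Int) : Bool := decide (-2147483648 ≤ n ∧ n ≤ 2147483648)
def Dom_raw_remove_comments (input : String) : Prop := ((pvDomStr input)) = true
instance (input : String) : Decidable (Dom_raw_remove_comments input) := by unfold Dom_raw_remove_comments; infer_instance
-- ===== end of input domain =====

-- B replaces A's per-character comment/empty flag machine by chunkwise scanning with find/slices; return value proved equal on all strings.

-- ===== PORT A =====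
-- one step of A's for-loop; state (comment, out, empty)
def pvAStep (st : Bool × String × Bool) (elem : Char) : Bool × String × Bool :=
  let (comment, out, empty) := st
  let (comment, out, empty) :=
    if comment = false then
      if elem = '%' then (true, out, false) else (comment, out.push elem, empty)
    else
      if elem = '%' then (if empty = false then (false, out, empty) else (comment, out, empty))
      else (comment, out, false)
  if elem = '\n' then (false, out, empty) else (comment, out, empty)

def raw_remove_comments (input : String) : String :=
  (input.toList.foldl pvAStep (false, "", true)).2.1

-- ===== PORT B =====
-- one outer iteration of Source B's while loop: emit input[i:j] (text up to the next '%',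
-- j = input.find('%', i); if none, emit input[i:] and stop), skip the comment body
-- (chars that are neither '%' nor '\n') plus one optional closer, recurse at i = k + 1
def pvScanB (l : List Char) : List Char :=
  let pre := l.takeWhile (fun c => !(c == '%'))
  match h : l.drop pre.length with
  | [] => pre
  | _ :: tail =>
      let body := tail.takeWhile (fun c => !(c == '%') && !(c == '\n'))
      pre ++ pvScanB (tail.drop (body.length + 1))
termination_by l.length
decreasing_by
  have h1 : tail.length < l.length := by
    have := congrArg List.length h
    simp [List.length_drop] at this
    omega
  simp only [List.length_drop]
  omega

def raw_remove_comments_alt (input : String) : String :=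
  String.ofList (pvScanB input.toList)

-- ===== PRECONDITION & SPEC =====
def Spec_raw_remove_comments (input : String) (out : String) : Prop := out = raw_remove_comments_alt input
instance (input : String) (out : String) : Decidable (Spec_raw_remove_comments input out) := by unfold Spec_raw_remove_comments; infer_instance

-- ===== CLAIM (what is proved, stated in full; the proofs are below) =====
def Claim_equal_raw_remove_comments : Prop := ∀ (input : String), Dom_raw_remove_comments input → Spec_raw_remove_comments input (raw_remove_comments input)

-- ===== LEMMAS AND PROOFS =====

theorem pvScanB_nil : pvScanB [] = [] := by
  rw [pvScanB]; split <;> simp_all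

theorem pvScanB_cons_ne (c : Char) (l : List Char) (hc : c ≠ '%') :
    pvScanB (c :: l) = c :: pvScanB l := by
  rw [pvScanB, pvScanB]
  have htw : List.takeWhile (fun c => !(c == '%')) (c :: l)
      = c :: List.takeWhile (fun c => !(c == '%')) l := by
    simp [hc]
  simp only [htw]
  split <;> rename_i h1 <;> split <;> rename_i h2 <;> simp_all

theorem pvScanB_cons_pct (l : List Char) :
    pvScanB ('%' :: l) =
      pvScanB (l.drop ((l.takeWhile (fun c => !(c == '%') && !(c == '\n'))).length + 1)) := by
  rw [pvScanB]
  have htw : List.takeWhile (fun c => !(c == '%')) ('%' :: l) = [] := by simp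
  simp only [htw]
  split <;> simp_all

theorem pvStep_false_pct (out : String) (e : Bool) :
    pvAStep (false, out, e) '%' = (true, out, false) := by
  simp [pvAStep]

theorem pvStep_false_ne (out : String) (e : Bool) (c : Char) (hc : c ≠ '%') :
    pvAStep (false, out, e) c = (false, out.push c, e) := by
  simp [pvAStep, hc]

theorem pvStep_true_pct (out : String) :
    pvAStep (true, out, false) '%' = (false, out, false) := by
  simp [pvAStep]

theorem pvStep_true_nl (out : String) :
    pvAStep (true, out, false) '\n' = (false, out, false) := by
  simp [pvAStep]

theorem pvStep_true_other (out : String) (c : Char) (hc : c ≠ '%') (hn : c ≠ '\n') :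
    pvAStep (true, out, false) c = (true, out, false) := by
  simp [pvAStep, hc, hn]

theorem pvPush_append_ofList (s : String) (c : Char) (t : List Char) :
    (s.push c) ++ String.ofList t = s ++ String.ofList (c :: t) := by
  apply String.toList_injective
  simp

theorem pvMain : ∀ n : Nat, ∀ l : List Char, l.length ≤ n →
    (∀ (out : String) (e : Bool),
      (l.foldl pvAStep (false, out, e)).2.1 = out ++ String.ofList (pvScanB l)) ∧
    (∀ (out : String),
      (l.foldl pvAStep (true, out, false)).2.1 =
        out ++ String.ofList (pvScanB
          (l.drop ((l.takeWhile (fun c => !(c == '%') && !(c == '\n'))).length + 1)))) := by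
  intro n
  induction n with
  | zero =>
      intro l hl
      have hnil : l = [] := by cases l <;> simp_all
      subst hnil
      constructor
      · intro out e; simp [pvScanB_nil]
      · intro out; simp [pvScanB_nil]
  | succ n ih =>
      intro l hl
      cases l with
      | nil =>
          constructor
          · intro out e; simp [pvScanB_nil]
          · intro out; simp [pvScanB_nil]
      | cons c rest =>
          have hrest : rest.length ≤ n := by simp at hl; omega
          constructor
          · intro out e
            by_cases hc : c = '%'
            · subst hc
              rw [List.foldl_cons, pvStep_false_pct, pvScanB_cons_pct]
              exact (ih rest hrest).2 out
            · rw [List.foldl_cons, pvStep_false_ne out e c hc, pvScanB_cons_ne c rest hc,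
                  ← pvPush_append_ofList]
              exact (ih rest hrest).1 (out.push c) e
          · intro out
            by_cases hc : c = '%'
            · subst hc
              rw [List.foldl_cons, pvStep_true_pct]
              have htw : List.takeWhile (fun c => !(c == '%') && !(c == '\n')) ('%' :: rest)
                  = [] := by simp
              rw [htw]
              simpa using (ih rest hrest).1 out false
            · by_cases hn : c = '\n'
              · subst hn
                rw [List.foldl_cons, pvStep_true_nl]
                have htw : List.takeWhile (fun c => !(c == '%') && !(c == '\n')) ('\n' :: rest)
                    = [] := by simp
                rw [htw]
                simpa using (ih rest hrest).1 out false
              · rw [List.foldl_cons, pvStep_true_other out c hc hn]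
                have htw : List.takeWhile (fun c => !(c == '%') && !(c == '\n')) (c :: rest)
                    = c :: List.takeWhile (fun c => !(c == '%') && !(c == '\n')) rest := by
                  simp [hc, hn]
                rw [htw]
                simpa [List.length_cons, List.drop_succ_cons] using (ih rest hrest).2 out

-- ===== VERDICT (by name: the statement is the Claim_ definition above) =====
theorem raw_remove_comments_spec : Claim_equal_raw_remove_comments := by
  intro input _
  unfold Spec_raw_remove_comments raw_remove_comments raw_remove_comments_alt
  have h := (pvMain input.toList.length input.toList le_rfl).1 "" true
  rw [h]
  apply String.toList_injective
  simp
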